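-- pv_equiv track=rewrite | github.com/quirk21/UNI | CSE221/lab6/Bs.py | bfs
-- ===== SOURCE A (Python) =====
-- from collections import defaultdict, deque
--
-- def bfs(graph, col, root):
--     q = deque([root])
--     col[root] = 0
--     count = [1, 0]
--     while q:
--         root = q.popleft()
--         for nx in graph[root]:
--             if col[nx] == -1:
--                 col[nx] = col[root]^1
--                 count[col[nx]] += 1
--                 q.append(nx)
--
--     return max(count)
-- ===== SOURCE B (Python) =====
-- def bfs(graph, col, root):
--     # Level-synchronous BFS: process the whole frontier per iteration and
--     # count newly colored nodes per level (color = level parity).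
--     col[root] = 0
--     count = [1, 0]
--     frontier = [root]
--     p = 0
--     while frontier:
--         np = 1 - p
--         nxt = []
--         for u in frontier:
--             for v in graph[u]:
--                 if col[v] == -1:
--                     col[v] = np
--                     nxt.append(v)
--         count[np] += len(nxt)
--         frontier = nxt
--         p = np
--     return max(count)
-- ===== Notes on version B (the rewrite author's own statement) =====
-- stated objective: alternative
-- what changed: Replaces the single popleft-queue BFS (per-node color read col[root]^1, per-node count increment) with a level-synchronous BFS that expands the whole frontier at once, colors new nodes with the flipped level parity and adds the level's batch size to the count once per level.
import Mathlib
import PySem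

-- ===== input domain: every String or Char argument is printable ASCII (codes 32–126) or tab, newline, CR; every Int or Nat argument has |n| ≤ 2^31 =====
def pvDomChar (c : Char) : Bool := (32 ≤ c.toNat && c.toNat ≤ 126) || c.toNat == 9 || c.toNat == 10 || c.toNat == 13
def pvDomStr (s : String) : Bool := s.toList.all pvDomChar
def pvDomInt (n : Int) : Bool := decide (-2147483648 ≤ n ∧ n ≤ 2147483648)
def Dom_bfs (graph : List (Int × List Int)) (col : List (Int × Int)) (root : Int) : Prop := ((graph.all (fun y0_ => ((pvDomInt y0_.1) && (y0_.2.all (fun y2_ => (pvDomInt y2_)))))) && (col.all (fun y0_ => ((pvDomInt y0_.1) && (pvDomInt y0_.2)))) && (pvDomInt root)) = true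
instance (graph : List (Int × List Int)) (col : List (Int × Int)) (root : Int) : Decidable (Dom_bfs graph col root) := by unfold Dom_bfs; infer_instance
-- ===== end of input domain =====

-- B replaces A's single-queue BFS by a level-synchronous BFS (whole-frontier expansion,
-- parity coloring, per-level batched counting); same O(V+E) cost, equal return value.
-- Both A and B mutate the caller's `col` dict identically; the theorem is about the return value.


-- ===== PORT A =====
-- Python `c ^ 1` for an int c: flip the last bit (exact for every Int).
def xor1 (c : Int) : Int := if c % 2 == 0 then c + 1 else c - 1

-- `count[c] += 1` on the 2-list count, index c ∈ {0,1} (the only colors A ever writes).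
def bump (c : Int) (count : Int × Int) : Int × Int :=
  if c == 0 then (count.1 + 1, count.2) else (count.1, count.2 + 1)

-- one iteration of A's inner `for nx in graph[root]` body, state = (col, count, appended)
def fA (r : Int) (st : PySem.Dict Int Int × (Int × Int) × List Int) (nx : Int) :
    PySem.Dict Int Int × (Int × Int) × List Int :=
  if st.1.getD nx 0 == -1 then
    let c := xor1 (st.1.getD r 0)
    (st.1.insert nx c, bump c st.2.1, st.2.2 ++ [nx])
  else st

-- A's `while q` loop; fuel (≥ number of pops on every non-raising input) makes it total.
def bfsLoop (graph : PySem.Dict Int (List Int)) :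
    Nat → List Int → PySem.Dict Int Int → Int × Int → Int
  | _, [], _, count => max count.1 count.2
  | 0, _ :: _, _, count => max count.1 count.2
  | fuel + 1, r :: q, col, count =>
      let s := (graph.getD r []).foldl (fA r) (col, count, [])
      bfsLoop graph fuel (q ++ s.2.2) s.1 s.2.1

def bfs (graph : List (Int × List Int)) (col : List (Int × Int)) (root : Int) : Int :=
  bfsLoop (PySem.Dict.ofList graph) (col.length + 1) [root]
    ((PySem.Dict.ofList col).insert root 0) (1, 0)

-- ===== PORT B =====
-- one iteration of B's `for v in graph[u]` body at level parity color np, state = (col, nxt)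
def fB (np : Int) (st : PySem.Dict Int Int × List Int) (v : Int) :
    PySem.Dict Int Int × List Int :=
  if st.1.getD v 0 == -1 then (st.1.insert v np, st.2 ++ [v]) else st

-- B's whole-level expansion: `for u in frontier: for v in graph[u]: …`
def levelExpand (graph : PySem.Dict Int (List Int)) (np : Int) (front : List Int)
    (col : PySem.Dict Int Int) : PySem.Dict Int Int × List Int :=
  front.foldl (fun st u => (graph.getD u []).foldl (fB np) st) (col, [])

-- `count[np] += k`
def addAt (np : Int) (k : Nat) (count : Int × Int) : Int × Int :=
  if np == 0 then (count.1 + k, count.2) else (count.1, count.2 + k)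

-- B's `while frontier` loop (one fuel unit per level)
def bfsLevels (graph : PySem.Dict Int (List Int)) :
    Nat → List Int → Int → PySem.Dict Int Int → Int × Int → Int
  | _, [], _, _, count => max count.1 count.2
  | 0, _ :: _, _, _, count => max count.1 count.2
  | fuel + 1, front@(_ :: _), p, col, count =>
      let np := 1 - p
      let s := levelExpand graph np front col
      bfsLevels graph fuel s.2 np s.1 (addAt np s.2.length count)

def bfs_alt (graph : List (Int × List Int)) (col : List (Int × Int)) (root : Int) : Int :=
  bfsLevels (PySem.Dict.ofList graph) (col.length + 1) [root] 0
    ((PySem.Dict.ofList col).insert root 0) (1, 0)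

-- ===== PRECONDITION & SPEC =====
-- the nodes A's traversal ever dequeues: the closure of {root} under "uncolored (-1) neighbor",
-- computed by saturating the edge relation (the closure is reached after ≤ |graph|+|col| rounds)
def pvReach (graph : List (Int × List Int)) (col : List (Int × Int)) (root : Int) : List Int :=
  (fun R => R ++ ((R.flatMap (fun u => (PySem.Dict.ofList graph).getD u [])).filter
      (fun v => decide ((PySem.Dict.ofList col).getD v 0 = -1) && !(R.contains v))))^[graph.length + col.length + 1]
    [root]

-- Pre_ excludes exactly the KeyError inputs: those where root is no key of graph, or where some
-- dequeued node (root or a reachable uncolored node) is no key of graph, or where some neighbor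
-- of a dequeued node is no key of col (root itself excepted: `col[root] = 0` adds it).
def Pre_bfs (graph : List (Int × List Int)) (col : List (Int × Int)) (root : Int) : Prop :=
  (graph.map Prod.fst).contains root = true ∧
  ∀ u ∈ pvReach graph col root,
    (graph.map Prod.fst).contains u = true ∧
    ∀ nx ∈ (PySem.Dict.ofList graph).getD u [],
      ((col.map Prod.fst).contains nx || nx == root) = true
instance (graph : List (Int × List Int)) (col : List (Int × Int)) (root : Int) : Decidable (Pre_bfs graph col root) := by unfold Pre_bfs; infer_instance

def pvWitness_bfs : (List (Int × List Int)) × (List (Int × Int)) × Int :=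
  ([(0, [1, 2]), (1, [0]), (2, [1])], [(0, -1), (1, -1), (2, -1)], 0)

def Spec_bfs (graph : List (Int × List Int)) (col : List (Int × Int)) (root : Int) (out : Int) : Prop := out = bfs_alt graph col root
instance (graph : List (Int × List Int)) (col : List (Int × Int)) (root : Int) (out : Int) : Decidable (Spec_bfs graph col root out) := by unfold Spec_bfs; infer_instance

-- ===== CLAIM (what is proved, stated in full; the proofs are below) =====
def Claim_equal_bfs : Prop := ∀ (graph : List (Int × List Int)) (col : List (Int × Int)) (root : Int), Dom_bfs graph col root → Pre_bfs graph col root → Spec_bfs graph col root (bfs graph col root)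

-- ===== LEMMAS AND PROOFS =====

-- number of still-uncolored entries of the dict (its -1 values)
def Ul (l : List (Int × Int)) : Nat := (l.filter (fun kv => kv.2 == -1)).length
def U (d : PySem.Dict Int Int) : Nat := Ul d.items

theorem bfsLoop_nil (g : PySem.Dict Int (List Int)) (f : Nat) (col : PySem.Dict Int Int)
    (count : Int × Int) : bfsLoop g f [] col count = max count.1 count.2 := by
  cases f <;> rfl

theorem bfsLoop_cons (g : PySem.Dict Int (List Int)) (f : Nat) (r : Int) (q : List Int)
    (col : PySem.Dict Int Int) (count : Int × Int) :
    bfsLoop g (f + 1) (r :: q) col count =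
      bfsLoop g f (q ++ ((g.getD r []).foldl (fA r) (col, count, [])).2.2)
        ((g.getD r []).foldl (fA r) (col, count, [])).1
        ((g.getD r []).foldl (fA r) (col, count, [])).2.1 := rfl

theorem bfsLevels_nil (g : PySem.Dict Int (List Int)) (f : Nat) (p : Int)
    (col : PySem.Dict Int Int) (count : Int × Int) :
    bfsLevels g f [] p col count = max count.1 count.2 := by
  cases f <;> rfl

theorem bfsLevels_cons (g : PySem.Dict Int (List Int)) (f : Nat) (r : Int) (q : List Int)
    (p : Int) (col : PySem.Dict Int Int) (count : Int × Int) :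
    bfsLevels g (f + 1) (r :: q) p col count =
      bfsLevels g f (levelExpand g (1 - p) (r :: q) col).2 (1 - p)
        (levelExpand g (1 - p) (r :: q) col).1
        (addAt (1 - p) (levelExpand g (1 - p) (r :: q) col).2.length count) := rfl

theorem addAt_zero (np : Int) (count : Int × Int) : addAt np 0 count = count := by
  simp [addAt]

theorem addAt_succ (np : Int) (n : Nat) (count : Int × Int) :
    addAt np (n + 1) count = addAt np n (bump np count) := by
  simp only [addAt, bump]
  split_ifs <;> simp <;> ring

theorem addAt_add (np : Int) (a b : Nat) (count : Int × Int) :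
    addAt np (a + b) count = addAt np b (addAt np a count) := by
  simp only [addAt]
  split_ifs <;> simp <;> ring

-- the appended-list component of the fA fold threads by concatenation
theorem fA_app (r : Int) (ns : List Int) :
    ∀ (col : PySem.Dict Int Int) (count : Int × Int) (app : List Int),
    ns.foldl (fA r) (col, count, app) =
      ((ns.foldl (fA r) (col, count, [])).1, (ns.foldl (fA r) (col, count, [])).2.1,
        app ++ (ns.foldl (fA r) (col, count, [])).2.2) := by
  induction ns with
  | nil => intro col count app; simp
  | cons v tl ih =>
    intro col count app
    simp only [List.foldl_cons]
    by_cases h : col.getD v 0 == -1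
    · simp only [fA, h, if_pos]
      simp only [List.nil_append]
      rw [ih _ _ (app ++ [v]), ih _ _ [v]]
      simp
    · simp only [fA, h, if_neg, Bool.false_eq_true, not_false_eq_true]
      exact ih col count app

theorem fB_app (np : Int) (ns : List Int) :
    ∀ (col : PySem.Dict Int Int) (app : List Int),
    ns.foldl (fB np) (col, app) =
      ((ns.foldl (fB np) (col, [])).1, app ++ (ns.foldl (fB np) (col, [])).2) := by
  induction ns with
  | nil => intro col app; simp
  | cons v tl ih =>
    intro col app
    simp only [List.foldl_cons]
    by_cases h : col.getD v 0 == -1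
    · simp only [fB, h, if_pos]
      simp only [List.nil_append]
      rw [ih _ (app ++ [v]), ih _ [v]]
      simp
    · simp only [fB, h, if_neg, Bool.false_eq_true, not_false_eq_true]
      exact ih col app

theorem get?_of_getD_neg1 (col : PySem.Dict Int Int) (k : Int) (h : col.getD k 0 = -1) :
    col.get? k = some (-1) := by
  cases hg : col.get? k with
  | none => rw [PySem.Dict.getD_of_get?_eq_none _ _ hg] at h; omega
  | some w => rw [PySem.Dict.getD_of_get?_eq_some _ _ hg] at h; rw [h]

theorem map_untouched (k : Int) (v : Int) (l : List (Int × Int))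
    (h : ∀ p ∈ l, p.1 ≠ k) :
    l.map (fun p => if p.1 == k then (k, v) else p) = l := by
  have he : ∀ p ∈ l, (fun p : Int × Int => if p.1 == k then (k, v) else p) p = id p := by
    intro p hp
    simp [h p hp]
  rw [List.map_congr_left he, List.map_id]

theorem Ul_cons (p : Int × Int) (l : List (Int × Int)) :
    Ul (p :: l) = (if p.2 = -1 then 1 else 0) + Ul l := by
  simp only [Ul, List.filter_cons]
  split_ifs with h1 h2 h2 <;> simp_all
  omega

theorem Ul_map_overwrite (k : Int) (v : Int) (hv : v ≠ -1) :
    ∀ l : List (Int × Int), (l.map Prod.fst).Nodup → (k, (-1 : Int)) ∈ l →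
    Ul (l.map (fun p => if p.1 == k then (k, v) else p)) + 1 = Ul l := by
  intro l
  induction l with
  | nil => intro _ hm; simp at hm
  | cons p tl ih =>
    intro hnd hm
    rw [List.map_cons, List.nodup_cons] at hnd
    by_cases hk : p.1 = k
    · have hpt : p = (k, -1) := by
        rcases List.mem_cons.mp hm with h | h
        · exact h.symm
        · have hmm : p.1 ∈ tl.map Prod.fst := by
            rw [hk]; exact List.mem_map.mpr ⟨(k, -1), h, rfl⟩
          exact absurd hmm hnd.1
      have htl : ∀ q ∈ tl, q.1 ≠ k := by
        intro q hq hqk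
        have hmm : p.1 ∈ tl.map Prod.fst := by
          rw [hk, ← hqk]; exact List.mem_map.mpr ⟨q, hq, rfl⟩
        exact hnd.1 hmm
      rw [List.map_cons, map_untouched k v tl htl, hpt]
      simp only [Ul_cons]
      have : ((if ((k : Int), v).1 == k then ((k : Int), v) else (k, v)).2 : Int) = v := by simp
      simp [hv]
      omega
    · have hm' : (k, (-1 : Int)) ∈ tl := by
        rcases List.mem_cons.mp hm with h | h
        · exact absurd (congrArg Prod.fst h.symm) (by simpa using hk)
        · exact h
      rw [List.map_cons]
      have hp : (if p.1 == k then ((k : Int), v) else p) = p := by simp [hk]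
      rw [hp]
      simp only [Ul_cons]
      have := ih hnd.2 hm'
      omega

theorem Ul_map_le (k : Int) (v : Int) (hv : v ≠ -1) (l : List (Int × Int)) :
    Ul (l.map (fun p => if p.1 == k then (k, v) else p)) ≤ Ul l := by
  induction l with
  | nil => simp [Ul]
  | cons p tl ih =>
    rw [List.map_cons]
    by_cases hk : p.1 = k
    · simp only [Ul_cons, hk, if_pos, beq_self_eq_true]
      split_ifs with h1 h2 <;> omega
    · have hp : (if p.1 == k then ((k : Int), v) else p) = p := by simp [hk]
      rw [hp]
      simp only [Ul_cons]
      omega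

-- overwriting a -1 entry with a non-(-1) value decreases U by one
theorem U_insert_dec (col : PySem.Dict Int Int) (hn : col.keys.Nodup) (k v : Int)
    (hv : v ≠ -1) (hk : col.getD k 0 = -1) : U (col.insert k v) + 1 = U col := by
  have hc : col.contains k = true := by
    rw [PySem.Dict.contains_eq_isSome_get?, get?_of_getD_neg1 col k hk]; rfl
  have hmem : (k, (-1 : Int)) ∈ col.items :=
    PySem.Dict.mem_items_of_get?_eq_some _ (get?_of_getD_neg1 col k hk)
  unfold U
  rw [PySem.Dict.items_insert_of_contains _ _ hc]
  exact Ul_map_overwrite k v hv col.items hn hmem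

theorem U_insert_le (col : PySem.Dict Int Int) (k v : Int) (hv : v ≠ -1) :
    U (col.insert k v) ≤ U col := by
  unfold U
  rw [PySem.Dict.items_insert]
  split_ifs with hc
  · exact Ul_map_le k v hv col.items
  · simp [Ul, List.filter_append, hv]

theorem Ul_map_le_succ (k v : Int) :
    ∀ l : List (Int × Int), (l.map Prod.fst).Nodup →
    Ul (l.map (fun p => if p.1 == k then (k, v) else p)) ≤ Ul l + 1 := by
  intro l
  induction l with
  | nil => intro _; simp [Ul]
  | cons p tl ih =>
    intro hnd
    rw [List.map_cons, List.nodup_cons] at hnd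
    rw [List.map_cons]
    by_cases hk : p.1 = k
    · have htl : ∀ q ∈ tl, q.1 ≠ k := by
        intro q hq hqk
        have hmm : p.1 ∈ tl.map Prod.fst := by
          rw [hk, ← hqk]; exact List.mem_map.mpr ⟨q, hq, rfl⟩
        exact hnd.1 hmm
      rw [map_untouched k v tl htl]
      simp only [Ul_cons, hk]
      split_ifs <;> omega
    · have hp : (if p.1 == k then ((k : Int), v) else p) = p := by simp [hk]
      rw [hp]
      simp only [Ul_cons]
      have := ih hnd.2
      omega

theorem U_insert_le_succ (col : PySem.Dict Int Int) (hn : col.keys.Nodup) (k v : Int) :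
    U (col.insert k v) ≤ U col + 1 := by
  unfold U
  rw [PySem.Dict.items_insert]
  split_ifs with hc
  · exact Ul_map_le_succ k v col.items hn
  · simp only [Ul, List.filter_append, List.length_append]
    have h1 : (([((k : Int), v)]).filter (fun kv => kv.2 == -1)).length ≤ 1 :=
      List.length_filter_le _ _
    omega

theorem U_ofList_le (l : List (Int × Int)) : U (PySem.Dict.ofList l) ≤ l.length := by
  suffices h : ∀ (l : List (Int × Int)) (d : PySem.Dict Int Int), d.keys.Nodup →
      U (l.foldl (fun d p => d.insert p.1 p.2) d) ≤ U d + l.length by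
    have h0 : U (PySem.Dict.empty : PySem.Dict Int Int) = 0 := rfl
    have hnd : (PySem.Dict.empty : PySem.Dict Int Int).keys.Nodup := List.nodup_nil
    have := h l PySem.Dict.empty hnd
    rw [h0] at this
    simpa [PySem.Dict.ofList] using this
  intro l
  induction l with
  | nil => intro d _; simp
  | cons p tl ih =>
    intro d hnd
    simp only [List.foldl_cons, List.length_cons]
    calc U (tl.foldl (fun d p => d.insert p.1 p.2) (d.insert p.1 p.2))
        ≤ U (d.insert p.1 p.2) + tl.length := ih _ (PySem.Dict.nodup_keys_insert _ _ _ hnd)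
      _ ≤ U d + 1 + tl.length := by have := U_insert_le_succ d hnd p.1 p.2; omega
      _ = U d + (tl.length + 1) := by omega

-- properties of one B-node expansion
theorem fB_props (np : Int) (hnp : np ≠ -1) (ns : List Int) :
    ∀ (col : PySem.Dict Int Int), col.keys.Nodup →
    ((ns.foldl (fB np) (col, [])).1.keys.Nodup
      ∧ (∀ k, col.getD k 0 ≠ -1 → (ns.foldl (fB np) (col, [])).1.getD k 0 = col.getD k 0)
      ∧ (∀ x ∈ (ns.foldl (fB np) (col, [])).2, (ns.foldl (fB np) (col, [])).1.getD x 0 = np)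
      ∧ U (ns.foldl (fB np) (col, [])).1 + (ns.foldl (fB np) (col, [])).2.length = U col) := by
  induction ns with
  | nil => intro col hnd; simp [hnd]
  | cons v tl ih =>
    intro col hnd
    simp only [List.foldl_cons]
    by_cases h : col.getD v 0 == -1
    · have hv1 : col.getD v 0 = -1 := by simpa using h
      simp only [fB, h, if_pos, List.nil_append]
      rw [fB_app np tl (col.insert v np) [v]]
      obtain ⟨ihn, ihp, ihc, ihu⟩ := ih (col.insert v np) (PySem.Dict.nodup_keys_insert _ _ _ hnd)
      refine ⟨ihn, ?_, ?_, ?_⟩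
      · intro k hk
        have hkv : k ≠ v := fun he => hk (he ▸ hv1)
        have h1 : (col.insert v np).getD k 0 = col.getD k 0 :=
          PySem.Dict.getD_insert_of_ne _ _ _ hkv
        rw [ihp k (by rw [h1]; exact hk), h1]
      · intro x hx
        rcases List.mem_append.mp hx with hx | hx
        · have hxv : x = v := by simpa using hx
          subst hxv
          have h1 : (col.insert x np).getD x 0 = np := PySem.Dict.getD_insert_self col x np 0
          rw [ihp x (by rw [h1]; exact hnp), h1]
        · exact ihc x hx
      · have hdec := U_insert_dec col hnd v np hnp hv1
        simp only [List.length_append, List.length_cons, List.length_nil]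
        omega
    · simp only [fB, h, if_neg, Bool.false_eq_true, not_false_eq_true]
      exact ih col hnd

theorem xor1_flip (p : Int) (hp : p = 0 ∨ p = 1) : xor1 p = 1 - p := by
  rcases hp with h | h <;> subst h <;> simp [xor1]

-- A's inner fold equals B's inner fold plus the batched count update
theorem fold_A_eq_B (r p : Int) (hp : p = 0 ∨ p = 1) (ns : List Int) :
    ∀ (col : PySem.Dict Int Int) (count : Int × Int), col.getD r 0 = p →
    ns.foldl (fA r) (col, count, []) =
      ((ns.foldl (fB (1 - p)) (col, [])).1,
        addAt (1 - p) (ns.foldl (fB (1 - p)) (col, [])).2.length count,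
        (ns.foldl (fB (1 - p)) (col, [])).2) := by
  induction ns with
  | nil => intro col count hr; simp [addAt_zero]
  | cons v tl ih =>
    intro col count hr
    simp only [List.foldl_cons]
    by_cases h : col.getD v 0 == -1
    · have hv1 : col.getD v 0 = -1 := by simpa using h
      have hvr : v ≠ r := by
        intro he; subst he; rw [hr] at hv1; rcases hp with h' | h' <;> omega
      have hc : xor1 (col.getD r 0) = 1 - p := by rw [hr]; exact xor1_flip p hp
      simp only [fA, fB, h, if_pos, hc, List.nil_append]
      have hr' : (col.insert v (1 - p)).getD r 0 = p := by
        rw [PySem.Dict.getD_insert_of_ne _ _ _ (Ne.symm hvr)]; exact hr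
      rw [fA_app r tl (col.insert v (1 - p)) (bump (1 - p) count) [v],
          fB_app (1 - p) tl (col.insert v (1 - p)) [v],
          ih (col.insert v (1 - p)) (bump (1 - p) count) hr']
      simp only [List.length_append, List.length_cons, List.length_nil]
      rw [Nat.add_comm _ 1, addAt_add]
      have h1 : addAt (1 - p) 1 count = bump (1 - p) count := by
        rw [show (1 : Nat) = 0 + 1 from rfl, addAt_succ, addAt_zero]
      rw [h1]
    · simp only [fA, fB, h, if_neg, Bool.false_eq_true, not_false_eq_true]
      exact ih col count hr

-- the next-frontier component of the level fold threads by concatenation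
theorem frontStep_app (g : PySem.Dict Int (List Int)) (np : Int) (front : List Int) :
    ∀ (col : PySem.Dict Int Int) (app : List Int),
    front.foldl (fun st u => (g.getD u []).foldl (fB np) st) (col, app) =
      ((levelExpand g np front col).1, app ++ (levelExpand g np front col).2) := by
  induction front with
  | nil => intro col app; simp [levelExpand]
  | cons r tl ih =>
    intro col app
    simp only [levelExpand, List.foldl_cons]
    rw [fB_app np (g.getD r []) col app]
    rw [ih _ (app ++ ((g.getD r []).foldl (fB np) (col, [])).2)]
    rw [show (g.getD r []).foldl (fB np) (col, []) =
        (((g.getD r []).foldl (fB np) (col, [])).1, ((g.getD r []).foldl (fB np) (col, [])).2)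
        from rfl]
    rw [ih _ ((g.getD r []).foldl (fB np) (col, [])).2]
    simp [levelExpand, List.append_assoc]

-- properties of a whole-level expansion
theorem LE_props (g : PySem.Dict Int (List Int)) (np : Int) (hnp : np ≠ -1) :
    ∀ (front : List Int) (col : PySem.Dict Int Int), col.keys.Nodup →
    ((levelExpand g np front col).1.keys.Nodup
      ∧ (∀ k, col.getD k 0 ≠ -1 → (levelExpand g np front col).1.getD k 0 = col.getD k 0)
      ∧ (∀ x ∈ (levelExpand g np front col).2, (levelExpand g np front col).1.getD x 0 = np)
      ∧ U (levelExpand g np front col).1 + (levelExpand g np front col).2.length = U col) := by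
  intro front
  induction front with
  | nil => intro col hnd; simp [levelExpand, hnd]
  | cons r tl ih =>
    intro col hnd
    have hLE : levelExpand g np (r :: tl) col =
        ((levelExpand g np tl ((g.getD r []).foldl (fB np) (col, [])).1).1,
          ((g.getD r []).foldl (fB np) (col, [])).2 ++
            (levelExpand g np tl ((g.getD r []).foldl (fB np) (col, [])).1).2) := by
      simp only [levelExpand, List.foldl_cons]
      rw [show (g.getD r []).foldl (fB np) (col, []) =
          (((g.getD r []).foldl (fB np) (col, [])).1, ((g.getD r []).foldl (fB np) (col, [])).2)
          from rfl]
      rw [frontStep_app g np tl _ _]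
      simp [levelExpand]
    obtain ⟨hn1, hp1, hc1, hu1⟩ := fB_props np hnp (g.getD r []) col hnd
    obtain ⟨hn2, hp2, hc2, hu2⟩ := ih ((g.getD r []).foldl (fB np) (col, [])).1 hn1
    rw [hLE]
    refine ⟨hn2, ?_, ?_, ?_⟩
    · intro k hk
      rw [hp2 k (by rw [hp1 k hk]; exact hk), hp1 k hk]
    · intro x hx
      rcases List.mem_append.mp hx with hx | hx
      · rw [hp2 x (by rw [hc1 x hx]; exact hnp), hc1 x hx]
      · exact hc2 x hx
    · simp only [List.length_append]
      omega

-- processing one whole level through A's queue loop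
theorem flush (g : PySem.Dict Int (List Int)) (p : Int) (hp : p = 0 ∨ p = 1) :
    ∀ (q1 : List Int) (fuel : Nat) (q2 : List Int) (col : PySem.Dict Int Int) (count : Int × Int),
    col.keys.Nodup → (∀ x ∈ q1, col.getD x 0 = p) →
    bfsLoop g (q1.length + fuel) (q1 ++ q2) col count =
      bfsLoop g fuel (q2 ++ (levelExpand g (1 - p) q1 col).2) (levelExpand g (1 - p) q1 col).1
        (addAt (1 - p) (levelExpand g (1 - p) q1 col).2.length count) := by
  have hnp : (1 - p : Int) ≠ -1 := by rcases hp with h | h <;> subst h <;> norm_num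
  intro q1
  induction q1 with
  | nil => intro fuel q2 col count _ _; simp [levelExpand, addAt_zero]
  | cons r tl ih =>
    intro fuel q2 col count hnd hq
    have hr : col.getD r 0 = p := hq r (List.mem_cons_self)
    have hLE : levelExpand g (1 - p) (r :: tl) col =
        ((levelExpand g (1 - p) tl ((g.getD r []).foldl (fB (1 - p)) (col, [])).1).1,
          ((g.getD r []).foldl (fB (1 - p)) (col, [])).2 ++
            (levelExpand g (1 - p) tl ((g.getD r []).foldl (fB (1 - p)) (col, [])).1).2) := by
      simp only [levelExpand, List.foldl_cons]
      rw [show (g.getD r []).foldl (fB (1 - p)) (col, []) =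
          (((g.getD r []).foldl (fB (1 - p)) (col, [])).1,
            ((g.getD r []).foldl (fB (1 - p)) (col, [])).2) from rfl]
      rw [frontStep_app g (1 - p) tl _ _]
      simp [levelExpand]
    obtain ⟨hn1, hp1, hc1, hu1⟩ := fB_props (1 - p) hnp (g.getD r []) col hnd
    have hstep : (r :: tl).length + fuel = (tl.length + fuel) + 1 := by
      simp [List.length_cons]; omega
    rw [hstep, List.cons_append, bfsLoop_cons]
    rw [fold_A_eq_B r p hp (g.getD r []) col count hr]
    have hq' : ∀ x ∈ tl, ((g.getD r []).foldl (fB (1 - p)) (col, [])).1.getD x 0 = p := by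
      intro x hx
      have hx' : col.getD x 0 = p := hq x (List.mem_cons_of_mem _ hx)
      have hxne : col.getD x 0 ≠ -1 := by rw [hx']; rcases hp with h | h <;> subst h <;> norm_num
      rw [hp1 x hxne, hx']
    rw [List.append_assoc]
    rw [ih fuel (q2 ++ ((g.getD r []).foldl (fB (1 - p)) (col, [])).2)
        ((g.getD r []).foldl (fB (1 - p)) (col, [])).1
        (addAt (1 - p) ((g.getD r []).foldl (fB (1 - p)) (col, [])).2.length count) hn1 hq']
    rw [hLE]
    simp only [List.length_append, List.append_assoc]
    rw [addAt_add]

-- A's queue loop equals B's level loop on any monochromatic frontier with enough fuel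
theorem levels (g : PySem.Dict Int (List Int)) :
    ∀ (fuelB : Nat) (front : List Int) (p : Int) (col : PySem.Dict Int Int)
      (count : Int × Int) (fuelA : Nat), col.keys.Nodup →
    (∀ x ∈ front, col.getD x 0 = p) → (p = 0 ∨ p = 1) →
    front.length + U col ≤ fuelA → (front = [] ∨ U col + 1 ≤ fuelB) →
    bfsLoop g fuelA front col count = bfsLevels g fuelB front p col count := by
  intro fuelB
  induction fuelB with
  | zero =>
    intro front p col count fuelA _ _ _ _ hB
    have hfe : front = [] := by
      rcases hB with h | h
      · exact h
      · omega
    subst hfe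
    rw [bfsLoop_nil, bfsLevels_nil]
  | succ fuelB ih =>
    intro front p col count fuelA hnd hq hp hA hB
    cases front with
    | nil => rw [bfsLoop_nil, bfsLevels_nil]
    | cons r rest =>
      have hnp : (1 - p : Int) ≠ -1 := by rcases hp with h | h <;> subst h <;> norm_num
      have hlen : (r :: rest).length ≤ fuelA := by
        have := hA; omega
      obtain ⟨fuel', hfuel⟩ : ∃ fuel', fuelA = (r :: rest).length + fuel' :=
        ⟨fuelA - (r :: rest).length, by omega⟩
      obtain ⟨hn2, hp2, hc2, hu2⟩ := LE_props g (1 - p) hnp (r :: rest) col hnd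
      rw [hfuel]
      have hflush := flush g p hp (r :: rest) fuel' [] col count hnd hq
      rw [List.append_nil] at hflush
      rw [hflush, bfsLevels_cons]
      simp only [List.nil_append]
      apply ih _ (1 - p) _ _ fuel' hn2 hc2 (by rcases hp with h | h <;> subst h <;> norm_num)
      · omega
      · have hUB : U col ≤ fuelB := by
          rcases hB with h | h
          · simp at h
          · omega
        by_cases hne : (levelExpand g (1 - p) (r :: rest) col).2 = []
        · exact Or.inl hne
        · refine Or.inr ?_
          have hpos : 0 < (levelExpand g (1 - p) (r :: rest) col).2.length :=
            List.length_pos_iff.mpr hne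
          omega

-- ===== VERDICT (by name: the statement is the Claim_ definition above) =====
theorem bfs_spec : Claim_equal_bfs := by
  intro graph col root _ _
  unfold Spec_bfs bfs bfs_alt
  have hC : U ((PySem.Dict.ofList col).insert root 0) ≤ col.length := by
    have h1 := U_insert_le (PySem.Dict.ofList col) root 0 (by norm_num)
    have h2 := U_ofList_le col
    omega
  apply levels
  · exact PySem.Dict.nodup_keys_insert _ _ _ (PySem.Dict.nodup_keys_ofList col)
  · intro x hx
    have hxr : x = root := by simpa using hx
    subst hxr
    exact PySem.Dict.getD_insert_self _ _ _ _
  · exact Or.inl rfl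
  · simp only [List.length_cons, List.length_nil]
    omega
  · right
    omega
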